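-- pv_equiv track=rewrite | github.com/DingdongMatch/mems | src/mems/routers/memories.py | _merge_live_messages
-- ===== SOURCE A (Python) =====
-- def _merge_live_messages(
--     history_messages: list[dict[str, str]], live_messages: list[dict[str, str]]
-- ) -> list[dict[str, str]]:
--     """Merge L1 history and live L0 messages without duplicating overlap.
--
--     合并 L1 历史与 L0 实时消息，并避免重复重叠片段。
--     """
--     if not history_messages:
--         return list(live_messages)
--     if not live_messages:
--         return list(history_messages)
--
--     if len(live_messages) >= len(history_messages):
--         for start in range(len(live_messages) - len(history_messages) + 1):
--             if live_messages[start : start + len(history_messages)] == history_messages: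
--                 return list(live_messages)
--
--     max_overlap = min(len(history_messages), len(live_messages))
--     for overlap in range(max_overlap, 0, -1):
--         if history_messages[-overlap:] == live_messages[:overlap]:
--             return history_messages + live_messages[overlap:]
--     return history_messages + live_messages
-- ===== SOURCE B (Python) =====
-- def _merge_live_messages(
--     history_messages: list[dict[str, str]], live_messages: list[dict[str, str]]
-- ) -> list[dict[str, str]]:
--     """Merge L1 history and live L0 messages without duplicating overlap.
--
--     KMP-style re-implementation: each message is canonicalised to a sorted
--     item tuple, and a prefix-function (failure table) pass over
--     pattern + sentinel + text answers each question at once — whether the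
--     history occurs inside the live list (a table entry equal to len(history))
--     and the longest history-suffix / live-prefix overlap (the last table
--     entry) — instead of A's sliding-window rescans.
--     """
--     if not history_messages:
--         return list(live_messages)
--     if not live_messages:
--         return list(history_messages)
--     hc = [tuple(sorted(d.items(), key=lambda kv: kv[0])) for d in history_messages]
--     lc = [tuple(sorted(d.items(), key=lambda kv: kv[0])) for d in live_messages]
--     sep = object()  # equal to nothing else: borders can never span it
--     if len(hc) in _prefix_function(hc + [sep] + lc):
--         return list(live_messages)
--     k = _prefix_function(lc + [sep] + hc)[-1]
--     return history_messages + live_messages[k:]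
--
--
-- def _prefix_function(s):
--     # pi[i] = length of the longest proper border of s[:i] (KMP failure table)
--     pi = [0, 0]
--     for q in range(1, len(s)):
--         k = pi[q]
--         while k > 0 and s[k] != s[q]:
--             k = pi[k]
--         pi.append(k + 1 if s[k] == s[q] else 0)
--     return pi
-- ===== Notes on version B (the rewrite author's own statement) =====
-- stated objective: alternative
-- what changed: Replaces A's sliding-window containment scan and descending slice-equality overlap loop by two KMP prefix-function (failure table) passes over canonicalised messages with a sentinel separator: a table entry equal to len(history) signals containment, and the last table entry is the longest suffix/prefix overlap.
import Mathlib
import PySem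

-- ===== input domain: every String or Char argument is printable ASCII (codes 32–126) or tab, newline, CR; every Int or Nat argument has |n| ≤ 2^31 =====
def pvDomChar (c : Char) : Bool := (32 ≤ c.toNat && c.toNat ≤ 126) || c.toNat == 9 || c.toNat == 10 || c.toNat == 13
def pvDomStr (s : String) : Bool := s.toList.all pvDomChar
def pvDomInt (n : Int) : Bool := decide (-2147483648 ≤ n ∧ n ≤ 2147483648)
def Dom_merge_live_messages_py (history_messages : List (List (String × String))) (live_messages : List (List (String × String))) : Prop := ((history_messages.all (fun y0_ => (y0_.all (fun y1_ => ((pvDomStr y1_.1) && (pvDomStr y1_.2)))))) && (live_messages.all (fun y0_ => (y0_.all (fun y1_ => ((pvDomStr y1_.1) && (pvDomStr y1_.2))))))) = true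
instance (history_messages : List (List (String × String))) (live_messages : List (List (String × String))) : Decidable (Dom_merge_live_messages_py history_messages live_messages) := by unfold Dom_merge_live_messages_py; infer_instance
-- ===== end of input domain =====

-- B replaces A's sliding-window containment scan and descending slice-equality overlap loop by two
-- KMP prefix-function (failure table) passes over canonicalised messages with a sentinel separator
-- (objective: alternative — a genuinely different algorithm for both questions).

-- Shared Python semantics used by PORT A: `d1 == d2` on two dicts (key/value equality,
-- insertion order ignored); exact for association lists coming from Python dicts (unique keys).
def pvDictEq (d1 d2 : List (String × String)) : Bool :=
  (d1.all fun kv => List.lookup kv.1 d2 == some kv.2) &&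
  (d2.all fun kv => List.lookup kv.1 d1 == some kv.2)

-- Python `==` on two lists of dicts (length check + elementwise dict equality over the zip).
def pvMsgsEq (xs ys : List (List (String × String))) : Bool :=
  xs.length == ys.length && (xs.zip ys).all fun q => pvDictEq q.1 q.2

-- ===== PORT A =====
def merge_live_messages_py (history_messages : List (List (String × String))) (live_messages : List (List (String × String))) : List (List (String × String)) :=
  if history_messages = [] then live_messages
  else if live_messages = [] then history_messages
  else if decide (history_messages.length ≤ live_messages.length) &&
      ((PySem.List.pyRange 0 ((live_messages.length : Int) - (history_messages.length : Int) + 1) 1).any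
        (fun start => pvMsgsEq (PySem.List.slice live_messages (some start) (some (start + (history_messages.length : Int)))) history_messages))
  then live_messages
  else
    match (PySem.List.pyRange ((min history_messages.length live_messages.length : Nat) : Int) 0 (-1)).findSome?
        (fun ov =>
          if pvMsgsEq (PySem.List.slice history_messages (some (-ov)) none)
                      (PySem.List.slice live_messages none (some ov))
          then some (history_messages ++ PySem.List.slice live_messages (some ov) none)
          else none) with
    | some r => r
    | none => history_messages ++ live_messages

-- ===== PORT B =====
-- canonical form of one message: sorted(d.items(), key=lambda kv: kv[0])
def pvCanon (d : List (String × String)) : List (String × String) :=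
  PySem.List.sorted d (fun kv => kv.1) false

-- the `while k > 0 and s[k] != s[q]: k = pi[k]` loop (fuel only makes it total;
-- the chain pi[k] < k always terminates within `k` steps)
def pfDescend {β : Type} [DecidableEq β] (s : List β) (pi : List Nat) (q : Nat) : Nat → Nat → Nat
  | 0, k => k
  | fuel+1, k => if 0 < k ∧ s[k]? ≠ s[q]? then pfDescend s pi q fuel (pi.getD k 0) else k

-- one iteration of the `for q in range(1, len(s))` loop: append pi[q+1]
def pfStep {β : Type} [DecidableEq β] (s : List β) (pi : List Nat) (q : Nat) : List Nat :=
  let k := pfDescend s pi q q (pi.getD q 0)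
  pi ++ [if s[k]? = s[q]? then k + 1 else 0]

-- _prefix_function(s): pi[i] = longest proper border of s[:i]
def pfTable {β : Type} [DecidableEq β] (s : List β) : List Nat :=
  (List.range' 1 (s.length - 1)).foldl (fun pi q => pfStep s pi q) [0, 0]

def merge_live_messages_py_alt (history_messages : List (List (String × String))) (live_messages : List (List (String × String))) : List (List (String × String)) :=
  if history_messages = [] then live_messages
  else if live_messages = [] then history_messages
  else
    let hc := history_messages.map pvCanon
    let lc := live_messages.map pvCanon
    if (pfTable (hc.map some ++ none :: lc.map some)).contains hc.length then live_messages
    else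
      let k := ((pfTable (lc.map some ++ none :: hc.map some)).getLast?).getD 0
      history_messages ++ live_messages.drop k

-- ===== PRECONDITION & SPEC =====
-- Pre_ excludes only association lists in which one message repeats a key — no Python dict can
-- produce such an input, so every input the Python A accepts is admitted.
def Pre_merge_live_messages_py (history_messages : List (List (String × String))) (live_messages : List (List (String × String))) : Prop :=
  (∀ m ∈ history_messages, (m.map Prod.fst).Nodup) ∧ (∀ m ∈ live_messages, (m.map Prod.fst).Nodup)
instance (history_messages : List (List (String × String))) (live_messages : List (List (String × String))) : Decidable (Pre_merge_live_messages_py history_messages live_messages) := by unfold Pre_merge_live_messages_py; infer_instance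

def pvWitness_merge_live_messages_py : (List (List (String × String))) × (List (List (String × String))) :=
  ([[("role", "user")]], [[("role", "user")], [("role", "assistant")]])

def Spec_merge_live_messages_py (history_messages : List (List (String × String))) (live_messages : List (List (String × String))) (out : List (List (String × String))) : Prop := out = merge_live_messages_py_alt history_messages live_messages
instance (history_messages : List (List (String × String))) (live_messages : List (List (String × String))) (out : List (List (String × String))) : Decidable (Spec_merge_live_messages_py history_messages live_messages out) := by unfold Spec_merge_live_messages_py; infer_instance

-- ===== CLAIM (what is proved, stated in full; the proofs are below) =====
def Claim_equal_merge_live_messages_py : Prop := ∀ (history_messages : List (List (String × String))) (live_messages : List (List (String × String))), Dom_merge_live_messages_py history_messages live_messages → Pre_merge_live_messages_py history_messages live_messages → Spec_merge_live_messages_py history_messages live_messages (merge_live_messages_py history_messages live_messages)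

-- ===== LEMMAS AND PROOFS =====

-- ---------- A-side spec helpers (proof-only): prefix / infix / overlap over pvDictEq ----------
def pvIsPrefix (p xs : List (List (String × String))) : Bool :=
  if xs.length < p.length then false
  else (p.zip xs).all fun q => pvDictEq q.1 q.2

def pvIsInfix (p : List (List (String × String))) : List (List (String × String)) → Bool
  | [] => pvIsPrefix p []
  | x :: t => pvIsPrefix p (x :: t) || pvIsInfix p t

def pvOverlap (l : List (List (String × String))) : List (List (String × String)) → Nat
  | [] => 0
  | x :: t => if pvIsPrefix (x :: t) l then (x :: t).length else pvOverlap l t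

-- greatest proper border of s.take q
def IsMaxBord {β : Type} (s : List β) (q b : Nat) : Prop :=
  b < q ∧ s.take b <:+ s.take q ∧ ∀ b', b' < q → s.take b' <:+ s.take q → b' ≤ b

-- the prefix-function table after processing q = 1 .. n
def pfT {β : Type} [DecidableEq β] (s : List β) (n : Nat) : List Nat :=
  (List.range' 1 n).foldl (fun pi q => pfStep s pi q) [0, 0]

-- ---------- dict-equality bridge: pvDictEq = canonical-form equality (nodup keys) ----------

theorem mem_of_lookup_eq_some {k v : String} : ∀ {b : List (String × String)},
    List.lookup k b = some v → (k, v) ∈ b := by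
  intro b
  induction b with
  | nil => simp [List.lookup]
  | cons x t ih =>
    intro h
    rw [List.lookup_cons] at h
    by_cases he : k == x.1
    · simp only [he] at h
      obtain ⟨hv⟩ := h
      have hk : k = x.1 := by simpa using he
      exact List.mem_cons.mpr (Or.inl (by cases x; simp_all))
    · simp only [he] at h
      exact List.mem_cons_of_mem _ (ih h)

theorem lookup_eq_some_of_mem {k v : String} : ∀ {b : List (String × String)},
    (b.map Prod.fst).Nodup → (k, v) ∈ b → List.lookup k b = some v := by
  intro b
  induction b with
  | nil => simp
  | cons x t ih =>
    intro hnd hm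
    rw [List.map_cons, List.nodup_cons] at hnd
    rw [List.lookup_cons]
    rcases List.mem_cons.mp hm with hx | hx
    · cases hx; simp
    · have hne : ¬ (k == x.1) := by
        simp only [beq_iff_eq]
        intro hk
        exact hnd.1 (hk ▸ (List.mem_map.mpr ⟨(k, v), hx, rfl⟩))
      simp only [hne]
      exact ih hnd.2 hx

theorem pvCanon_perm (a : List (String × String)) : (pvCanon a).Perm a :=
  PySem.List.sorted_perm a (fun kv => kv.1) false

theorem pvCanon_eq_of_perm {a b : List (String × String)}
    (hb : (b.map Prod.fst).Nodup) (hp : a.Perm b) : pvCanon a = pvCanon b := by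
  have hcb : (pvCanon b).Perm a := (pvCanon_perm b).trans hp.symm
  have hnd : ((pvCanon b).map Prod.fst).Nodup :=
    (((pvCanon_perm b).map Prod.fst).nodup_iff).mpr hb
  have hle : (pvCanon b).Pairwise (fun x y => x.1 ≤ y.1) :=
    PySem.List.sorted_pairwise b (fun kv => kv.1)
  have hne : (pvCanon b).Pairwise (fun x y => x.1 ≠ y.1) := List.pairwise_map.mp hnd
  have hlt : (pvCanon b).Pairwise (fun x y => x.1 < y.1) :=
    (hle.and hne).imp (fun h => lt_of_le_of_ne h.1 h.2)
  exact PySem.List.sorted_eq_of_perm_of_pairwise_lt a (pvCanon b) (fun kv => kv.1) hcb hlt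

theorem dictEq_iff {a b : List (String × String)}
    (ha : (a.map Prod.fst).Nodup) (hb : (b.map Prod.fst).Nodup) :
    pvDictEq a b = true ↔ pvCanon a = pvCanon b := by
  have hna : a.Nodup := ha.of_map
  have hnb : b.Nodup := hb.of_map
  constructor
  · intro h
    simp only [pvDictEq, Bool.and_eq_true, List.all_eq_true, beq_iff_eq] at h
    have hperm : a.Perm b := by
      rw [List.perm_ext_iff_of_nodup hna hnb]
      intro x
      constructor
      · intro hx; exact mem_of_lookup_eq_some (h.1 x hx)
      · intro hx; exact mem_of_lookup_eq_some (h.2 x hx)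
    exact pvCanon_eq_of_perm hb hperm
  · intro h
    have hperm : a.Perm b := (pvCanon_perm a).symm.trans (h ▸ pvCanon_perm b)
    simp only [pvDictEq, Bool.and_eq_true, List.all_eq_true, beq_iff_eq]
    constructor
    · intro kv hkv
      exact lookup_eq_some_of_mem hb (hperm.mem_iff.mp hkv)
    · intro kv hkv
      exact lookup_eq_some_of_mem ha (hperm.symm.mem_iff.mp hkv)

-- ---------- A-side loop characterisations (window scan, overlap loop) ----------

theorem pvDictEq_symm (a b : List (String × String)) : pvDictEq a b = pvDictEq b a := by
  simp [pvDictEq, Bool.and_comm]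

theorem pvMsgsEq_nil_left (ys : List (List (String × String))) :
    pvMsgsEq [] ys = (ys.length == 0) := by
  cases ys <;> simp [pvMsgsEq]

theorem pvMsgsEq_cons_cons (a b : List (String × String)) (xs ys : List (List (String × String))) :
    pvMsgsEq (a :: xs) (b :: ys) = (pvDictEq a b && pvMsgsEq xs ys) := by
  simp [pvMsgsEq, Bool.and_left_comm]

theorem pvMsgsEq_symm (xs : List (List (String × String))) :
    ∀ ys, pvMsgsEq xs ys = pvMsgsEq ys xs := by
  induction xs with
  | nil => intro ys; cases ys <;> simp [pvMsgsEq]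
  | cons a xs ih =>
    intro ys; cases ys with
    | nil => simp [pvMsgsEq]
    | cons b ys => simp [pvMsgsEq_cons_cons, ih, pvDictEq_symm a b]

theorem pvIsPrefix_nil (xs : List (List (String × String))) : pvIsPrefix [] xs = true := by
  simp [pvIsPrefix]

theorem pvIsPrefix_cons_nil (a : List (String × String)) (p : List (List (String × String))) :
    pvIsPrefix (a :: p) [] = false := by
  simp [pvIsPrefix]

theorem pvIsPrefix_cons_cons (a b : List (String × String)) (p xs : List (List (String × String))) :
    pvIsPrefix (a :: p) (b :: xs) = (pvDictEq a b && pvIsPrefix p xs) := by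
  by_cases hl : xs.length < p.length
  · simp [pvIsPrefix, hl, Nat.succ_lt_succ hl]
  · simp [pvIsPrefix, hl]

theorem length_le_of_pvIsPrefix {p xs : List (List (String × String))}
    (hp : pvIsPrefix p xs = true) : p.length ≤ xs.length := by
  by_contra hlt
  simp [pvIsPrefix, Nat.lt_of_not_le hlt] at hp

theorem pvIsPrefix_eq_false_of_lt {p xs : List (List (String × String))}
    (hlt : xs.length < p.length) : pvIsPrefix p xs = false := by
  simp [pvIsPrefix, hlt]

theorem pvMsgsEq_take_eq_isPrefix (p : List (List (String × String))) :
    ∀ xs, pvMsgsEq (List.take p.length xs) p = pvIsPrefix p xs := by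
  induction p with
  | nil => intro xs; simp [pvMsgsEq_nil_left, pvIsPrefix_nil]
  | cons a p ih =>
    intro xs; cases xs with
    | nil => simp [pvMsgsEq_nil_left, pvIsPrefix_cons_nil]
    | cons b xs =>
      simp [List.take_succ_cons, pvMsgsEq_cons_cons, pvIsPrefix_cons_cons, ih,
        pvDictEq_symm b a]

theorem pvMsgsEq_drop_take (t l : List (List (String × String))) :
    pvMsgsEq t (l.take t.length) = pvIsPrefix t l := by
  rw [pvMsgsEq_symm, pvMsgsEq_take_eq_isPrefix]

theorem pvIsInfix_iff (p : List (List (String × String))) :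
    ∀ xs, pvIsInfix p xs = true ↔ ∃ j, pvIsPrefix p (List.drop j xs) = true := by
  intro xs; induction xs with
  | nil =>
    simp only [pvIsInfix]
    constructor
    · intro h; exact ⟨0, h⟩
    · rintro ⟨j, hj⟩; simpa using hj
  | cons x t ih =>
    simp only [pvIsInfix, Bool.or_eq_true, ih]
    constructor
    · rintro (h | ⟨j, hj⟩)
      · exact ⟨0, h⟩
      · exact ⟨j + 1, by simpa using hj⟩
    · rintro ⟨j, hj⟩
      cases j with
      | zero => exact Or.inl (by simpa using hj)
      | succ j => exact Or.inr ⟨j, by simpa using hj⟩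

theorem pvOverlap_ne_nil (l : List (List (String × String)))
    {t : List (List (String × String))} (ht : t ≠ []) :
    pvOverlap l t = if pvIsPrefix t l then t.length else pvOverlap l t.tail := by
  cases t with
  | nil => cases ht rfl
  | cons x r => rfl

theorem pvOverlap_drop (l : List (List (String × String))) :
    ∀ t, pvOverlap l t = pvOverlap l (t.drop (t.length - min t.length l.length)) := by
  intro t; induction t with
  | nil => simp
  | cons x t ih =>
    by_cases hle : t.length + 1 ≤ l.length
    · have h0 : t.length + 1 - min (t.length + 1) l.length = 0 := by omega
      simp [h0]
    · have hlt : l.length < (x :: t).length := by simp; omega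
      have h1 : pvOverlap l (x :: t) = pvOverlap l t := by
        simp [pvOverlap, pvIsPrefix_eq_false_of_lt hlt]
      have h2 : t.length + 1 - min (t.length + 1) l.length
          = (t.length - min t.length l.length) + 1 := by omega
      rw [h1, ih]
      simp only [List.length_cons, h2, List.drop_succ_cons]

theorem phase1_eq (h l : List (List (String × String))) :
    (decide (h.length ≤ l.length) &&
      ((PySem.List.pyRange 0 ((l.length : Int) - (h.length : Int) + 1) 1).any
        (fun start => pvMsgsEq (PySem.List.slice l (some start) (some (start + (h.length : Int)))) h)))
    = pvIsInfix h l := by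
  rw [Bool.eq_iff_iff]
  simp only [Bool.and_eq_true, decide_eq_true_eq, List.any_eq_true]
  constructor
  · rintro ⟨hnm, x, hx, hcond⟩
    rw [PySem.List.mem_pyRange_one] at hx
    obtain ⟨s, rfl⟩ : ∃ s : Nat, x = (s : Int) := ⟨x.toNat, (Int.toNat_of_nonneg hx.1).symm⟩
    rw [pvIsInfix_iff]
    refine ⟨s, ?_⟩
    rw [← pvMsgsEq_take_eq_isPrefix]
    rw [PySem.List.slice_natCast_add] at hcond
    exact hcond
  · intro hinf
    rw [pvIsInfix_iff] at hinf
    obtain ⟨j, hj⟩ := hinf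
    have hdl : List.drop (min j l.length) l = List.drop j l := by
      rcases Nat.le_total j l.length with hc | hc
      · rw [Nat.min_eq_left hc]
      · rw [Nat.min_eq_right hc, List.drop_eq_nil_of_le hc, List.drop_eq_nil_of_le le_rfl]
    set j0 := min j l.length with hj0
    have hj' : pvIsPrefix h (List.drop j0 l) = true := by rw [hdl]; exact hj
    have hlen := length_le_of_pvIsPrefix hj'
    rw [List.length_drop] at hlen
    have hj0l : j0 ≤ l.length := Nat.min_le_right _ _
    refine ⟨by omega, (j0 : Int), ?_, ?_⟩
    · rw [PySem.List.mem_pyRange_one]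
      constructor
      · positivity
      · omega
    · rw [PySem.List.slice_natCast_add, pvMsgsEq_take_eq_isPrefix]
      exact hj'

theorem phase2 (h l : List (List (String × String))) : ∀ k0 : Nat, k0 ≤ h.length → k0 ≤ l.length →
    (match (PySem.List.pyRange (k0 : Int) 0 (-1)).findSome?
        (fun ov =>
          if pvMsgsEq (PySem.List.slice h (some (-ov)) none) (PySem.List.slice l none (some ov))
          then some (h ++ PySem.List.slice l (some ov) none) else none) with
     | some r => r
     | none => h ++ l)
    = h ++ l.drop (pvOverlap l (h.drop (h.length - k0))) := by
  intro k0
  induction k0 with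
  | zero =>
    intro _ _
    simp only [Nat.cast_zero]
    rw [PySem.List.pyRange_neg_one_eq_nil (le_refl 0)]
    simp [List.findSome?, List.drop_length, pvOverlap]
  | succ k0 ih =>
    intro hkh hkl
    have hpos : (0 : Int) < ((k0 + 1 : Nat) : Int) := by positivity
    rw [PySem.List.pyRange_neg_one_cons hpos]
    have hsub : ((k0 + 1 : Nat) : Int) - 1 = ((k0 : Nat) : Int) := by omega
    rw [hsub, List.findSome?_cons]
    have hs1 : PySem.List.slice h (some (-((k0 + 1 : Nat) : Int))) none
        = h.drop (h.length - (k0 + 1)) :=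
      PySem.List.slice_from_neg_natCast h (k0 + 1) (by omega)
    have hs2 : PySem.List.slice l none (some ((k0 + 1 : Nat) : Int)) = l.take (k0 + 1) :=
      PySem.List.slice_to_natCast l (k0 + 1)
    have hs3 : PySem.List.slice l (some ((k0 + 1 : Nat) : Int)) none = l.drop (k0 + 1) :=
      PySem.List.slice_from_natCast l (k0 + 1)
    have hlen_t : (h.drop (h.length - (k0 + 1))).length = k0 + 1 := by
      rw [List.length_drop]; omega
    have hcond : pvMsgsEq (h.drop (h.length - (k0 + 1))) (l.take (k0 + 1))
        = pvIsPrefix (h.drop (h.length - (k0 + 1))) l := by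
      have hgen := pvMsgsEq_drop_take (h.drop (h.length - (k0 + 1))) l
      rwa [hlen_t] at hgen
    have hne : h.drop (h.length - (k0 + 1)) ≠ [] := by
      intro hx
      rw [hx] at hlen_t
      simp at hlen_t
    have harith : h.length - (k0 + 1) + 1 = h.length - k0 := by omega
    have hov : pvOverlap l (h.drop (h.length - (k0 + 1)))
        = if pvIsPrefix (h.drop (h.length - (k0 + 1))) l then k0 + 1
          else pvOverlap l (h.drop (h.length - k0)) := by
      rw [pvOverlap_ne_nil l hne, hlen_t, List.tail_drop, harith]
    by_cases hP : pvIsPrefix (h.drop (h.length - (k0 + 1))) l = true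
    · rw [hs1, hs2, hs3, hcond]
      simp only [hP, if_true, hov]
    · rw [hs1, hs2, hs3, hcond]
      simp only [Bool.not_eq_true] at hP
      simp only [hP, Bool.false_eq_true, if_false, hov]
      exact ih (by omega) (by omega)


theorem msgsEq_iff : ∀ {xs ys : List (List (String × String))},
    (∀ m ∈ xs, (m.map Prod.fst).Nodup) → (∀ m ∈ ys, (m.map Prod.fst).Nodup) →
    (pvMsgsEq xs ys = true ↔ xs.map pvCanon = ys.map pvCanon) := by
  intro xs
  induction xs with
  | nil =>
    intro ys _ _
    rw [pvMsgsEq_nil_left]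
    cases ys <;> simp
  | cons a xs ih =>
    intro ys hx hy
    cases ys with
    | nil => simp [pvMsgsEq]
    | cons b ys =>
      rw [pvMsgsEq_cons_cons]
      simp only [Bool.and_eq_true, List.map_cons, List.cons.injEq]
      rw [dictEq_iff (hx a (by simp)) (hy b (by simp)),
        ih (fun m hm => hx m (by simp [hm])) (fun m hm => hy m (by simp [hm]))]

-- the overlap loop computes the greatest k with  suffix-of-h (length k) a pvIsPrefix of l
theorem pvOverlap_max (l : List (List (String × String))) : ∀ t : List (List (String × String)),
    pvOverlap l t ≤ t.length ∧
    pvIsPrefix (t.drop (t.length - pvOverlap l t)) l = true ∧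
    ∀ k, k ≤ t.length → pvIsPrefix (t.drop (t.length - k)) l = true → k ≤ pvOverlap l t := by
  intro t
  induction t with
  | nil =>
    refine ⟨le_refl 0, by simpa using pvIsPrefix_nil l, ?_⟩
    intro k hk _
    simp at hk
    omega
  | cons x t ih =>
    by_cases hP : pvIsPrefix (x :: t) l = true
    · have hr : pvOverlap l (x :: t) = t.length + 1 := by simp [pvOverlap, hP]
      refine ⟨by rw [hr]; simp, ?_, ?_⟩
      · rw [hr]; simpa using hP
      · intro k hk _; rw [hr]; simpa using hk
    · have hr : pvOverlap l (x :: t) = pvOverlap l t := by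
        simp only [pvOverlap]
        simp [hP]
      obtain ⟨h1, h2, h3⟩ := ih
      refine ⟨by rw [hr]; simp; omega, ?_, ?_⟩
      · rw [hr]
        have : (x :: t).length - pvOverlap l t = (t.length - pvOverlap l t) + 1 := by
          simp only [List.length_cons]; omega
        rw [this, List.drop_succ_cons]
        exact h2
      · intro k hk hpre
        rw [hr]
        rcases Nat.lt_or_ge k (t.length + 1) with hlt | hge
        · have hk' : k ≤ t.length := by omega
          apply h3 k hk'
          have : (x :: t).length - k = (t.length - k) + 1 := by
            simp only [List.length_cons]; omega
          rwa [this, List.drop_succ_cons] at hpre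
        · exfalso
          have hk1 : k = t.length + 1 := by simp at hk; omega
          rw [hk1] at hpre
          simp at hpre
          exact hP hpre

-- pvIsPrefix through canonicalisation: a plain List prefix equation
theorem isPrefix_canon {p xs : List (List (String × String))}
    (hp : ∀ m ∈ p, (m.map Prod.fst).Nodup) (hx : ∀ m ∈ xs, (m.map Prod.fst).Nodup) :
    pvIsPrefix p xs = true ↔ (xs.map pvCanon).take p.length = p.map pvCanon := by
  rw [← pvMsgsEq_take_eq_isPrefix]
  rw [msgsEq_iff (fun m hm => hx m (List.mem_of_mem_take hm)) hp, List.map_take]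

-- ---------- prefix-function correctness ----------

theorem isMaxBord_unique {β : Type} {s : List β} {q b b' : Nat}
    (h1 : IsMaxBord s q b) (h2 : IsMaxBord s q b') : b = b' := by
  exact Nat.le_antisymm (h2.2.2 b h1.1 h1.2.1) (h1.2.2 b' h2.1 h2.2.1)

theorem suffix_concat_iff {β : Type} (a b : β) (xs ys : List β) :
    (xs ++ [a]) <:+ (ys ++ [b]) ↔ a = b ∧ xs <:+ ys := by
  rw [← List.reverse_prefix]
  simp only [List.reverse_append, List.reverse_cons, List.reverse_nil, List.nil_append,
    List.singleton_append]
  rw [List.cons_prefix_cons, List.reverse_prefix]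

theorem pfT_succ {β : Type} [DecidableEq β] (s : List β) (n : Nat) :
    pfT s (n + 1) = pfStep s (pfT s n) (n + 1) := by
  unfold pfT
  rw [List.range'_1_concat, List.foldl_append]
  simp [Nat.add_comm]


theorem pfDescend_spec {β : Type} [DecidableEq β] (s : List β) (pi : List Nat) (q : Nat)
    (hq : q < s.length)
    (Htab : ∀ i, 1 ≤ i → i ≤ q → IsMaxBord s i (pi.getD i 0)) :
    ∀ fuel k, k ≤ fuel → k < q → s.take k <:+ s.take q →
    (∀ b, b < q → s.take b <:+ s.take q → s[b]? = s[q]? → b ≤ k) →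
    pfDescend s pi q fuel k < q ∧
    s.take (pfDescend s pi q fuel k) <:+ s.take q ∧
    (∀ b, b < q → s.take b <:+ s.take q → s[b]? = s[q]? → b ≤ pfDescend s pi q fuel k) ∧
    (pfDescend s pi q fuel k = 0 ∨ s[pfDescend s pi q fuel k]? = s[q]?) := by
  intro fuel
  induction fuel with
  | zero =>
    intro k hk hkq hsuf hbnd
    have hk0 : k = 0 := Nat.le_zero.mp hk
    subst hk0
    exact ⟨hkq, hsuf, hbnd, Or.inl rfl⟩
  | succ fuel ih =>
    intro k hk hkq hsuf hbnd
    by_cases hc : 0 < k ∧ s[k]? ≠ s[q]?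
    · rw [show pfDescend s pi q (fuel+1) k = pfDescend s pi q fuel (pi.getD k 0) by
        simp [pfDescend, hc]]
      obtain ⟨hk0, hne⟩ := hc
      have hmb : IsMaxBord s k (pi.getD k 0) := Htab k hk0 (Nat.le_of_lt hkq)
      set k' := pi.getD k 0 with hk'
      have hk'lt : k' < k := hmb.1
      apply ih
      · omega
      · omega
      · exact hmb.2.1.trans hsuf
      · intro b hb hbsuf hbeq
        have hbk : b ≤ k := hbnd b hb hbsuf hbeq
        have hbk' : b < k := by
          rcases Nat.lt_or_eq_of_le hbk with h | h
          · exact h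
          · exact absurd (h ▸ hbeq) hne
        -- b is a border of s.take k
        have hlen1 : (s.take b).length ≤ (s.take k).length := by
          simp only [List.length_take]
          omega
        have hbk2 : s.take b <:+ s.take k :=
          List.suffix_of_suffix_length_le hbsuf hsuf hlen1
        exact hmb.2.2 b hbk' hbk2
    · rw [show pfDescend s pi q (fuel+1) k = k by simp [pfDescend, hc]]
      refine ⟨hkq, hsuf, hbnd, ?_⟩
      push Not at hc
      by_cases h0 : k = 0
      · exact Or.inl h0
      · exact Or.inr (not_not.mp (by intro hne; exact hne (hc (Nat.pos_of_ne_zero h0))) )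

theorem getD_append_self (l₁ : List Nat) (v d : Nat) : (l₁ ++ [v]).getD l₁.length d = v := by
  rw [List.getD_eq_getElem?_getD, List.getElem?_append_right (le_refl _)]
  simp

theorem pfT_inv {β : Type} [DecidableEq β] (s : List β) :
    ∀ n, n + 1 ≤ s.length →
    (pfT s n).length = n + 2 ∧
    ∀ i, 1 ≤ i → i ≤ n + 1 → IsMaxBord s i ((pfT s n).getD i 0) := by
  intro n
  induction n with
  | zero =>
    intro _
    refine ⟨rfl, ?_⟩
    intro i h1 h2
    have : i = 1 := by omega
    subst this
    rw [show (pfT s 0).getD 1 0 = 0 from rfl]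
    refine ⟨Nat.zero_lt_one, by simp, ?_⟩
    intro b' hb' _
    omega
  | succ n ih =>
    intro hlen
    obtain ⟨ihlen, ihtab⟩ := ih (by omega)
    set q := n + 1 with hqdef
    have hq : q < s.length := by omega
    set pi := pfT s n with hpidef
    have hQtab : ∀ i, 1 ≤ i → i ≤ q → IsMaxBord s i (pi.getD i 0) := fun i h1 h2 => ihtab i h1 h2
    have hmbq : IsMaxBord s q (pi.getD q 0) := hQtab q (by omega) (le_refl q)
    set k0 := pi.getD q 0 with hk0def
    have hk0q : k0 < q := hmbq.1
    have hdesc := pfDescend_spec s pi q hq hQtab q k0 (by omega) hmbq.1 hmbq.2.1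
      (fun b hb hbsuf _ => hmbq.2.2 b hb hbsuf)
    set r := pfDescend s pi q q k0 with hrdef
    obtain ⟨hr1, hr2, hr3, hr4⟩ := hdesc
    have hstep : pfT s (n+1) = pi ++ [if s[r]? = s[q]? then r + 1 else 0] := by
      rw [pfT_succ]
      rfl
    have hsq : s[q]? = some s[q] := List.getElem?_eq_getElem hq
    -- the new entry is the greatest proper border of s.take (q+1)
    have hnew : IsMaxBord s (q+1) (if s[r]? = s[q]? then r + 1 else 0) := by
      have hmax : ∀ b', b' < q + 1 → s.take b' <:+ s.take (q+1) →
          b' = 0 ∨ (∃ c, b' = c + 1 ∧ c < q ∧ s.take c <:+ s.take q ∧ s[c]? = s[q]?) := by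
        intro b' hb' hbsuf
        cases b' with
        | zero => exact Or.inl rfl
        | succ c =>
          right
          have hc : c < q := by omega
          have hcs : c < s.length := by omega
          rw [List.take_add_one, List.take_add_one, hsq,
            List.getElem?_eq_getElem hcs] at hbsuf
          simp only [Option.toList_some] at hbsuf
          rw [suffix_concat_iff] at hbsuf
          exact ⟨c, rfl, hc, hbsuf.2, by rw [List.getElem?_eq_getElem hcs, hsq, hbsuf.1]⟩
      by_cases heq : s[r]? = s[q]?
      · simp only [heq, if_true]
        refine ⟨by omega, ?_, ?_⟩
        · have hrs : r < s.length := by omega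
          rw [List.take_add_one, List.take_add_one, hsq]
          have : s[r]? = some s[r] := List.getElem?_eq_getElem hrs
          rw [this, hsq, Option.some.injEq] at heq
          rw [List.getElem?_eq_getElem hrs]
          simp only [Option.toList_some, heq]
          exact (suffix_concat_iff _ _ _ _).mpr ⟨rfl, hr2⟩
        · intro b' hb' hbsuf
          rcases hmax b' hb' hbsuf with h0 | ⟨c, rfl, hc, hcsuf, hceq⟩
          · omega
          · have := hr3 c hc hcsuf hceq
            omega
      · simp only [heq, if_false]
        have hr0 : r = 0 := by
          rcases hr4 with h | h
          · exact h
          · exact absurd h heq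
        refine ⟨by omega, by simp, ?_⟩
        intro b' hb' hbsuf
        rcases hmax b' hb' hbsuf with h0 | ⟨c, rfl, hc, hcsuf, hceq⟩
        · omega
        · exfalso
          have := hr3 c hc hcsuf hceq
          have hc0 : c = 0 := by omega
          rw [hc0, ← hr0] at hceq
          exact heq hceq
    constructor
    · rw [hstep, List.length_append, ihlen]
      rfl
    · intro i h1 h2
      rcases Nat.lt_or_ge i (n + 2) with hi | hi
      · rw [hstep, List.getD_append _ _ _ _ (by omega)]
        exact hQtab i h1 (by omega)
      · have hieq : i = n + 2 := by omega
        subst hieq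
        rw [hstep]
        have : pi.length = n + 2 := ihlen
        rw [show n + 2 = pi.length from this.symm, getD_append_self]
        rw [this]
        exact hnew

theorem sep_getElem_none {γ : Type} (xs ys : List γ) (i : Nat) :
    (xs.map some ++ none :: ys.map some)[i]? = some none ↔ i = xs.length := by
  rcases Nat.lt_trichotomy i xs.length with hi | hi | hi
  · rw [List.getElem?_append_left (by simpa using hi)]
    rw [List.getElem?_map]
    constructor
    · intro h
      exfalso
      have : i < xs.length := hi
      rw [List.getElem?_eq_getElem this] at h
      simp at h
    · intro h; omega
  · subst hi
    rw [List.getElem?_append_right (by simp)]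
    simp
  · rw [List.getElem?_append_right (by simp; omega)]
    have : i - (xs.map some).length = (i - xs.length - 1) + 1 := by simp; omega
    rw [this]
    simp only [List.getElem?_cons_succ, List.getElem?_map]
    constructor
    · intro h
      exfalso
      cases hys : ys[i - xs.length - 1]? with
      | none => rw [hys] at h; simp at h
      | some v => rw [hys] at h; simp at h
    · intro h; omega

theorem sep_border_iff {γ : Type} (as bs : List γ) (k : Nat)
    (hk : k < (as.map some ++ none :: bs.map some).length) :
    ((as.map some ++ none :: bs.map some).take k <:+ (as.map some ++ none :: bs.map some)) ↔
    (k ≤ as.length ∧ k ≤ bs.length ∧ as.take k = bs.drop (bs.length - k)) := by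
  set w := as.map some ++ none :: bs.map some with hw
  have hlw : w.length = as.length + bs.length + 1 := by simp [hw]; omega
  constructor
  · intro hsuf
    have hlen : (w.take k).length = k := by
      rw [List.length_take]; omega
    have hdrop : w.take k = w.drop (w.length - k) := by
      have := List.suffix_iff_eq_drop.mp hsuf
      rwa [hlen] at this
    have hA : k ≤ as.length := by
      by_contra hgt
      have h1 : (w.take k)[as.length]? = some none := by
        rw [List.getElem?_take_of_lt (by omega), sep_getElem_none]
      rw [hdrop, List.getElem?_drop, sep_getElem_none] at h1
      omega
    have hB : k ≤ bs.length := by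
      by_contra hgt
      -- index (k - bs.length - 1) of the take hits an `as` element, of the drop hits the sentinel
      have hj : k - bs.length - 1 < as.length := by omega
      have h1 : (w.take k)[k - bs.length - 1]? = w[k - bs.length - 1]? := by
        rw [List.getElem?_take_of_lt (by omega)]
      have h2 : w[k - bs.length - 1]? = some (some as[k - bs.length - 1]) := by
        rw [hw, List.getElem?_append_left (by simpa using hj), List.getElem?_map,
          List.getElem?_eq_getElem hj]
        rfl
      have h3 : (w.drop (w.length - k))[k - bs.length - 1]? = some none := by
        rw [List.getElem?_drop]
        have : w.length - k + (k - bs.length - 1) = as.length := by omega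
        rw [this, sep_getElem_none]
      rw [hdrop, h3] at h1
      rw [h2] at h1
      simp at h1
    refine ⟨hA, hB, ?_⟩
    have htake : w.take k = (as.take k).map some := by
      rw [hw, List.take_append_of_le_length (by simpa using hA), List.map_take]
    have hdrop2 : w.drop (w.length - k) = (bs.drop (bs.length - k)).map some := by
      have harith : w.length - k = ((as.map some ++ [none]) ++ bs.map some).length - k := by
        rw [hlw]; simp; omega
      have harith2 : ((as.map some ++ [none]) ++ bs.map some).length - k
          = (as.map some ++ [none]).length + (bs.length - k) := by
        simp; omega
      rw [harith, harith2,
        show w = (as.map some ++ [none]) ++ bs.map some by rw [hw]; simp,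
        List.drop_length_add_append, List.map_drop]
    rw [htake, hdrop2] at hdrop
    exact List.map_injective_iff.mpr (Option.some_injective _) hdrop
  · rintro ⟨hA, hB, heq⟩
    have htake : w.take k = (as.take k).map some := by
      rw [hw, List.take_append_of_le_length (by simpa using hA), List.map_take]
    have hdrop2 : w.drop (w.length - k) = (bs.drop (bs.length - k)).map some := by
      have harith : w.length - k = ((as.map some ++ [none]) ++ bs.map some).length - k := by
        rw [hlw]; simp; omega
      have harith2 : ((as.map some ++ [none]) ++ bs.map some).length - k
          = (as.map some ++ [none]).length + (bs.length - k) := by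
        simp; omega
      rw [harith, harith2,
        show w = (as.map some ++ [none]) ++ bs.map some by rw [hw]; simp,
        List.drop_length_add_append, List.map_drop]
    rw [htake, heq, ← hdrop2]
    exact List.drop_suffix _ _

theorem pfTable_eq_pfT {β : Type} [DecidableEq β] (s : List β) :
    pfTable s = pfT s (s.length - 1) := rfl

theorem pfT_prefix {β : Type} [DecidableEq β] (s : List β) (n : Nat) :
    ∃ t, pfT s n = [0, 0] ++ t := by
  induction n with
  | zero => exact ⟨[], rfl⟩
  | succ n ih =>
    obtain ⟨t, ht⟩ := ih
    rw [pfT_succ]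
    unfold pfStep
    rw [ht]
    exact ⟨_, List.append_assoc _ _ _⟩

theorem pfT_getD_zero {β : Type} [DecidableEq β] (s : List β) (n : Nat) :
    (pfT s n).getD 0 0 = 0 := by
  obtain ⟨t, ht⟩ := pfT_prefix s n
  rw [ht]; rfl

theorem pfTable_spec {β : Type} [DecidableEq β] (s : List β) (hs : s ≠ []) :
    (pfTable s).length = s.length + 1 ∧
    ∀ i, 1 ≤ i → i ≤ s.length → IsMaxBord s i ((pfTable s).getD i 0) := by
  have hlen : 1 ≤ s.length := List.length_pos_iff.mpr hs
  have := pfT_inv s (s.length - 1) (by omega)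
  rw [pfTable_eq_pfT]
  refine ⟨?_, ?_⟩
  · rw [this.1]; omega
  · intro i h1 h2
    exact this.2 i h1 (by omega)


theorem sep_contains_iff {γ : Type} [DecidableEq γ] (ps ts : List γ) (hps : ps ≠ []) :
    ((pfTable (ps.map some ++ none :: ts.map some)).contains ps.length = true) ↔
    ∃ j, ps <+: ts.drop j := by
  set w := ps.map some ++ none :: ts.map some with hw
  have hwne : w ≠ [] := by simp [hw]
  have hm1 : 1 ≤ ps.length := List.length_pos_iff.mpr hps
  set m := ps.length with hm
  have hlw : w.length = m + ts.length + 1 := by simp [hw]; omega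
  obtain ⟨htlen, htab⟩ := pfTable_spec w hwne
  have hwtm : w.take m = ps.map some := by
    rw [hw, List.take_append_of_le_length (by simp [hm]),
      show m = (ps.map some).length by simp [hm], List.take_length]
  rw [List.contains_iff_mem]
  constructor
  · intro hmem
    obtain ⟨i, hi, hgi⟩ := List.mem_iff_getElem.mp hmem
    have hgd : (pfTable w).getD i 0 = m := by
      rw [List.getD_eq_getElem?_getD, List.getElem?_eq_getElem hi, hgi]
      rfl
    have hi1 : 1 ≤ i := by
      rcases Nat.eq_zero_or_pos i with h0 | h1
      · exfalso
        rw [h0, pfTable_eq_pfT, pfT_getD_zero] at hgd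
        omega
      · exact h1
    have hiw : i ≤ w.length := by rw [htlen] at hi; omega
    have hmb : IsMaxBord w i m := hgd ▸ htab i hi1 hiw
    obtain ⟨hmi, hsuf, _⟩ := hmb
    have hlenti : (w.take i).length = i := by rw [List.length_take]; omega
    have hlm : (w.take m).length = m := by rw [List.length_take]; omega
    have hdropeq : (w.take i).drop (i - m) = w.take m := by
      have := List.suffix_iff_eq_drop.mp hsuf
      rw [hlenti, hlm] at this
      exact this.symm
    rw [hwtm] at hdropeq
    -- the matched copy of ps cannot cross the sentinel
    have hstep1 : m + 1 ≤ i - m := by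
      by_contra hle
      have him : 1 ≤ i - m := by omega
      set jx := m - (i - m) with hjx
      have hjxm : jx < m := by omega
      have h2 : (ps.map some)[jx]? = w[i - m + jx]? := by
        rw [← hdropeq, List.getElem?_drop, List.getElem?_take_of_lt (by omega)]
      have h3 : i - m + jx = m := by omega
      rw [h3, hw, (sep_getElem_none ps ts m).mpr hm] at h2
      rw [List.getElem?_map, List.getElem?_eq_getElem (show jx < ps.length by omega)] at h2
      simp at h2
    -- extract the occurrence position
    set j := i - m - (m + 1) with hjdef
    refine ⟨j, ?_⟩
    have hX : w = (ps.map some ++ [none]) ++ ts.map some := by rw [hw]; simp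
    have hXlen : (ps.map some ++ [none]).length = m + 1 := by simp [hm]
    have htki : w.take i = (ps.map some ++ [none]) ++ (ts.map some).take (j + m) := by
      rw [hX, show i = (ps.map some ++ [none]).length + (j + m) by rw [hXlen]; omega,
        List.take_length_add_append]
    have hdrop2 : (w.take i).drop (i - m) = ((ts.map some).take (j + m)).drop j := by
      rw [htki, show i - m = (ps.map some ++ [none]).length + j by rw [hXlen]; omega,
        List.drop_length_add_append]
    rw [hdrop2] at hdropeq
    rw [← List.take_drop] at hdropeq
    rw [List.prefix_iff_eq_take]
    rw [← List.map_drop, ← List.map_take] at hdropeq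
    exact (List.map_injective_iff.mpr (Option.some_injective _) hdropeq).symm
  · rintro ⟨j, hpre⟩
    have hmle : m ≤ (ts.drop j).length := by
      have := hpre.length_le
      simpa [hm] using this
    rw [List.length_drop] at hmle
    have hjm : j + m ≤ ts.length := by omega
    set i := m + 1 + j + m with hidef
    have hiw : i ≤ w.length := by omega
    have htke : (ts.drop j).take m = ps := (List.prefix_iff_eq_take.mp hpre).symm
    have hX : w = (ps.map some ++ [none]) ++ ts.map some := by rw [hw]; simp
    have hXlen : (ps.map some ++ [none]).length = m + 1 := by simp [hm]
    have htki : w.take i = (ps.map some ++ [none]) ++ ((ts.map some).take j ++ ps.map some) := by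
      rw [hX, show i = (ps.map some ++ [none]).length + (j + m) by rw [hXlen]; omega,
        List.take_length_add_append, List.take_add]
      simp only [← List.map_take, ← List.map_drop, htke]
    have hmb : IsMaxBord w i m := by
      refine ⟨by omega, ?_, ?_⟩
      · rw [hwtm, htki, ← List.append_assoc]
        exact List.suffix_append _ _
      · intro b' hb' hbsuf
        by_contra hgt
        have hmb' : m < b' := by omega
        have hlenti : (w.take i).length = i := by rw [List.length_take]; omega
        have hlb : (w.take b').length = b' := by rw [List.length_take]; omega
        have hdr : (w.take i).drop (i - b') = w.take b' := by
          have := List.suffix_iff_eq_drop.mp hbsuf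
          rw [hlenti, hlb] at this
          exact this.symm
        have h1 : (w.take b')[m]? = w[m]? := List.getElem?_take_of_lt (by omega)
        have h2 : ((w.take i).drop (i - b'))[m]? = w[i - b' + m]? := by
          rw [List.getElem?_drop, List.getElem?_take_of_lt (by omega)]
        rw [hdr, h1] at h2
        rw [hw, (sep_getElem_none ps ts m).mpr hm] at h2
        have : (List.map some ps ++ none :: List.map some ts)[i - b' + m]? = some none := h2.symm
        rw [sep_getElem_none] at this
        omega
    have hgd : (pfTable w).getD i 0 = m :=
      isMaxBord_unique (htab i (by omega) hiw) hmb
    have hilt : i < (pfTable w).length := by rw [htlen]; omega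
    apply List.mem_iff_getElem.mpr ⟨i, hilt, ?_⟩
    rw [← hgd, List.getD_eq_getElem?_getD, List.getElem?_eq_getElem hilt]
    rfl


-- ---------- glue: the two B-side questions answered by the prefix-function tables ----------

theorem isInfix_eq_contains {h l : List (List (String × String))} (hh : h ≠ [])
    (hpre1 : ∀ m ∈ h, (m.map Prod.fst).Nodup) (hpre2 : ∀ m ∈ l, (m.map Prod.fst).Nodup) :
    pvIsInfix h l
      = (pfTable ((h.map pvCanon).map some ++ none :: (l.map pvCanon).map some)).contains
          (h.map pvCanon).length := by
  rw [Bool.eq_iff_iff, pvIsInfix_iff,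
    sep_contains_iff (h.map pvCanon) (l.map pvCanon) (by simpa using hh)]
  constructor
  · rintro ⟨j, hj⟩
    refine ⟨j, ?_⟩
    rw [isPrefix_canon hpre1 (fun m hm => hpre2 m (List.mem_of_mem_drop hm))] at hj
    rw [List.prefix_iff_eq_take, List.length_map, ← List.map_drop]
    exact hj.symm
  · rintro ⟨j, hj⟩
    refine ⟨j, ?_⟩
    rw [isPrefix_canon hpre1 (fun m hm => hpre2 m (List.mem_of_mem_drop hm))]
    rw [List.prefix_iff_eq_take, List.length_map, ← List.map_drop] at hj
    exact hj.symm

theorem overlap_eq_last {h l : List (List (String × String))}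
    (hpre1 : ∀ m ∈ h, (m.map Prod.fst).Nodup) (hpre2 : ∀ m ∈ l, (m.map Prod.fst).Nodup) :
    pvOverlap l h
      = ((pfTable ((l.map pvCanon).map some ++ none :: (h.map pvCanon).map some)).getLast?).getD 0 := by
  set H := h.map pvCanon with hH
  set L := l.map pvCanon with hL
  have hHlen : H.length = h.length := by rw [hH, List.length_map]
  have hLlen : L.length = l.length := by rw [hL, List.length_map]
  set w := L.map some ++ none :: H.map some with hw
  have hwne : w ≠ [] := by simp [hw]
  have hlw : w.length = L.length + H.length + 1 := by simp [hw]; omega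
  obtain ⟨htlen, htab⟩ := pfTable_spec w hwne
  have hlast : ((pfTable w).getLast?).getD 0 = (pfTable w).getD w.length 0 := by
    rw [List.getLast?_eq_getElem?, List.getD_eq_getElem?_getD, htlen]
    rfl
  set kB := (pfTable w).getD w.length 0 with hkB
  have hmb : IsMaxBord w w.length kB := htab w.length (by omega) (le_refl _)
  -- translate the last table entry into a suffix/prefix overlap of L over H
  have hQb : kB ≤ L.length ∧ kB ≤ H.length ∧ L.take kB = H.drop (H.length - kB) := by
    rw [← sep_border_iff L H kB hmb.1]
    have := hmb.2.1
    rwa [List.take_length] at this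
  -- translate pvIsPrefix of a history suffix into the same shape
  have htrans : ∀ k, k ≤ h.length →
      (pvIsPrefix (h.drop (h.length - k)) l = true ↔ L.take k = H.drop (H.length - k)) := by
    intro k hk
    rw [isPrefix_canon (fun m hm => hpre1 m (List.mem_of_mem_drop hm)) hpre2]
    have hlen : (h.drop (h.length - k)).length = k := by
      rw [List.length_drop]; omega
    rw [hlen, List.map_drop, ← hL, ← hH, ← hHlen]
  obtain ⟨hr1, hr2, hr3⟩ := pvOverlap_max l h
  set r := pvOverlap l h with hr
  have hrQ : L.take r = H.drop (H.length - r) := (htrans r hr1).mp hr2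
  have hrL : r ≤ L.length := by
    have h1 : (L.take r).length = min r L.length := by rw [List.length_take]
    have h2 : (H.drop (H.length - r)).length = r := by
      rw [List.length_drop]
      omega
    rw [hrQ, h2] at h1
    omega
  have hrH : r ≤ H.length := by omega
  have hrw : r < (L.map some ++ none :: H.map some).length := by
    simp only [List.length_append, List.length_map, List.length_cons]
    omega
  have hrle : r ≤ kB := by
    apply hmb.2.2 r hrw
    rw [List.take_length]
    exact (sep_border_iff L H r hrw).mpr ⟨hrL, hrH, hrQ⟩
  have hkle : kB ≤ r := by
    apply hr3 kB (by omega)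
    exact (htrans kB (by omega)).mpr hQb.2.2
  rw [hlast]
  omega

-- B's non-trivial branch, written out (the `let`s reduce definitionally)
theorem alt_eq {h l : List (List (String × String))} (hh : h ≠ []) (hl : l ≠ []) :
    merge_live_messages_py_alt h l
      = if (pfTable ((h.map pvCanon).map some ++ none :: (l.map pvCanon).map some)).contains
            (h.map pvCanon).length
        then l
        else h ++ l.drop
          (((pfTable ((l.map pvCanon).map some ++ none :: (h.map pvCanon).map some)).getLast?).getD 0) := by
  unfold merge_live_messages_py_alt
  rw [if_neg hh, if_neg hl]

-- ===== VERDICT (by name: the statement is the Claim_ definition above) =====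
theorem merge_live_messages_py_spec : Claim_equal_merge_live_messages_py := by
  intro h l _ hpre
  unfold Spec_merge_live_messages_py merge_live_messages_py
  by_cases hh : h = []
  · simp [hh, merge_live_messages_py_alt]
  · by_cases hl : l = []
    · simp [hh, hl, merge_live_messages_py_alt]
    · rw [alt_eq hh hl]
      simp only [hh, hl, if_false]
      rw [phase1_eq, isInfix_eq_contains hh hpre.1 hpre.2]
      by_cases hinf : (pfTable ((h.map pvCanon).map some ++ none :: (l.map pvCanon).map some)).contains (h.map pvCanon).length = true
      · simp only [hinf, if_true]
      · simp only [Bool.not_eq_true] at hinf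
        simp only [hinf, Bool.false_eq_true, if_false]
        rw [phase2 h l (min h.length l.length) (Nat.min_le_left _ _) (Nat.min_le_right _ _)]
        rw [← pvOverlap_drop, overlap_eq_last hpre.1 hpre.2]
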